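-- pv_equiv track=rewrite | github.com/PennShenLab/mref-ad | analysis/compute_model_params.py | _flex_modality_groups
-- ===== SOURCE A (Python) =====
-- def _flex_modality_groups(groups, selected_letters: str):
--     selected_letters = selected_letters.upper()
--     mapping = {"A": "amy", "M": "mri", "D": "demographic"}
--     want = {mapping[c] for c in selected_letters if c in mapping}
--     out = {k: [] for k in ["amy", "mri", "demographic"] if k in want}
--     for expert, cols in groups.items():
--         name = expert.lower()
--         if name.startswith("amy_") and "amy" in out:
--             out["amy"].extend(cols)
--         elif name.startswith("mri_") and "mri" in out:
--             out["mri"].extend(cols)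
--         elif name == "demographic" and "demographic" in out:
--             out["demographic"].extend(cols)
--     out = {k: list(dict.fromkeys(v)) for k, v in out.items() if len(v) > 0}
--     if len(out) == 0:
--         raise ValueError("No modality columns found for requested --modality")
--     return out
-- ===== SOURCE B (Python) =====
-- def _matches(modality, name):
--     if modality == "amy":
--         return name.startswith("amy_")
--     if modality == "mri":
--         return name.startswith("mri_")
--     return name == "demographic"
--
--
-- def _flex_modality_groups(groups, selected_letters: str):
--     sel = set(selected_letters.upper())
--     out = {}
--     for modality, letter in (("amy", "A"), ("mri", "M"), ("demographic", "D")):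
--         if letter not in sel:
--             continue
--         cols = []
--         for expert, cs in groups.items():
--             if _matches(modality, expert.lower()):
--                 cols.extend(cs)
--         cols = list(dict.fromkeys(cols))
--         if cols:
--             out[modality] = cols
--     if not out:
--         raise ValueError("No modality columns found for requested --modality")
--     return out
-- ===== Notes on version B (the rewrite author's own statement) =====
-- stated objective: alternative
-- what changed: B is modality-driven instead of group-driven: an outer loop over the fixed modalities (filtered by the selected letters) each doing its own scan of groups and per-modality dedup, replacing A's single pass over groups with if/elif dispatch into pre-built buckets plus a final filter/dedup comprehension.
import Mathlib
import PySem

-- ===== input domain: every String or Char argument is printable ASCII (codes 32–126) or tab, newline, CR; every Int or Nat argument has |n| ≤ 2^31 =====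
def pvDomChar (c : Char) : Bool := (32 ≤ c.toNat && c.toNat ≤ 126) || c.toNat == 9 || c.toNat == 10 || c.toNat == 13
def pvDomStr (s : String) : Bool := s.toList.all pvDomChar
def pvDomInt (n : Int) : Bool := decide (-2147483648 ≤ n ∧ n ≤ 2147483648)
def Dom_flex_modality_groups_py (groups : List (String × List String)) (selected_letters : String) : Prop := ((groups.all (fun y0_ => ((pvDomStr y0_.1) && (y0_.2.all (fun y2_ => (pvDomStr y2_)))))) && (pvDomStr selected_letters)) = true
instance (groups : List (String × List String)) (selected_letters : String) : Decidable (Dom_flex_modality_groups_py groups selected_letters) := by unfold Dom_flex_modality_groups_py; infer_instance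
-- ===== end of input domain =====

-- B replaces A's single group-driven pass (if/elif dispatch into pre-built buckets, then filter+dedup)
-- by an outer loop over the fixed modalities, each scanning groups and deduplicating its own column list.

-- ===== PORT A =====
-- mapping = {"A": "amy", "M": "mri", "D": "demographic"} (the 1-char string keys are represented as Chars,
-- matching Python's iteration over selected_letters character by character)
def pyMapping : List (Char × String) := [('A', "amy"), ('M', "mri"), ('D', "demographic")]

-- want = {mapping[c] for c in selected_letters.upper() if c in mapping}
def aWant (selected_letters : String) : PySem.Set String :=
  (PySem.Str.upper selected_letters).toList.foldl (fun s c =>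
    match List.lookup c pyMapping with
    | some m => PySem.Set.add s m
    | none => s) []

-- out = {k: [] for k in ["amy", "mri", "demographic"] if k in want}
def aOut0 (selected_letters : String) : List (String × List String) :=
  (["amy", "mri", "demographic"].filter (fun k => PySem.Set.contains (aWant selected_letters) k)).map
    (fun k => (k, ([] : List String)))

-- loop body: dict update of a fixed key set, written element-wise ("k in out" = key membership,
-- out[k].extend(cols) = append at that key)
def aLoopStep (out : List (String × List String)) (ec : String × List String) : List (String × List String) :=
  let name := PySem.Str.lower ec.1
  if PySem.Str.startswith name "amy_" && out.any (fun kv => kv.1 == "amy") then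
    out.map (fun kv => if kv.1 == "amy" then (kv.1, kv.2 ++ ec.2) else kv)
  else if PySem.Str.startswith name "mri_" && out.any (fun kv => kv.1 == "mri") then
    out.map (fun kv => if kv.1 == "mri" then (kv.1, kv.2 ++ ec.2) else kv)
  else if name == "demographic" && out.any (fun kv => kv.1 == "demographic") then
    out.map (fun kv => if kv.1 == "demographic" then (kv.1, kv.2 ++ ec.2) else kv)
  else out

def flex_modality_groups_py (groups : List (String × List String)) (selected_letters : String) : List (String × List String) :=
  -- out = {k: list(dict.fromkeys(v)) for k, v in out.items() if len(v) > 0}; an empty result raises ValueError (outside Pre_)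
  ((groups.foldl aLoopStep (aOut0 selected_letters)).filter (fun kv => kv.2.length > 0)).map
    (fun kv => (kv.1, PySem.List.dedup kv.2))

-- ===== PORT B =====
def bMatches (modality name : String) : Bool :=
  if modality == "amy" then PySem.Str.startswith name "amy_"
  else if modality == "mri" then PySem.Str.startswith name "mri_"
  else name == "demographic"

-- the inner scan of groups for one modality
def bCollect (groups : List (String × List String)) (modality : String) : List String :=
  groups.foldl (fun cs ec => if bMatches modality (PySem.Str.lower ec.1) then cs ++ ec.2 else cs) []

def flex_modality_groups_py_alt (groups : List (String × List String)) (selected_letters : String) : List (String × List String) :=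
  let sel : PySem.Set Char := PySem.Set.ofList (PySem.Str.upper selected_letters).toList
  [("amy", 'A'), ("mri", 'M'), ("demographic", 'D')].foldl (fun out ml =>
    if PySem.Set.contains sel ml.2 then
      let cols := PySem.List.dedup (bCollect groups ml.1)
      if cols.isEmpty then out else out ++ [(ml.1, cols)]
    else out) []
  -- an empty result raises the same ValueError (outside Pre_)

-- ===== PRECONDITION & SPEC =====
-- Pre_ excludes exactly the inputs on which A (and B alike) raises ValueError: no group with a
-- nonempty column list matches a selected modality, so the resulting dict would be empty.
def Pre_flex_modality_groups_py (groups : List (String × List String)) (selected_letters : String) : Prop :=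
  (groups.any (fun ec =>
    !ec.2.isEmpty &&
      ((PySem.Str.startswith (PySem.Str.lower ec.1) "amy_" && (PySem.Str.upper selected_letters).toList.contains 'A') ||
       (PySem.Str.startswith (PySem.Str.lower ec.1) "mri_" && (PySem.Str.upper selected_letters).toList.contains 'M') ||
       (PySem.Str.lower ec.1 == "demographic" && (PySem.Str.upper selected_letters).toList.contains 'D')))) = true
instance (groups : List (String × List String)) (selected_letters : String) : Decidable (Pre_flex_modality_groups_py groups selected_letters) := by unfold Pre_flex_modality_groups_py; infer_instance

def pvWitness_flex_modality_groups_py : (List (String × List String)) × String :=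
  ([("amy_pet", ["p1", "p2"]), ("demographic", ["age"])], "ad")

def Spec_flex_modality_groups_py (groups : List (String × List String)) (selected_letters : String) (out : List (String × List String)) : Prop := out = flex_modality_groups_py_alt groups selected_letters
instance (groups : List (String × List String)) (selected_letters : String) (out : List (String × List String)) : Decidable (Spec_flex_modality_groups_py groups selected_letters out) := by unfold Spec_flex_modality_groups_py; infer_instance

-- ===== CLAIM (what is proved, stated in full; the proofs are below) =====
def Claim_equal_flex_modality_groups_py : Prop := ∀ (groups : List (String × List String)) (selected_letters : String), Dom_flex_modality_groups_py groups selected_letters → Pre_flex_modality_groups_py groups selected_letters → Spec_flex_modality_groups_py groups selected_letters (flex_modality_groups_py groups selected_letters)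

-- ===== LEMMAS AND PROOFS =====

-- mutual exclusivity of the three name predicates
theorem excl_amy_mri (n : List Char) (h : PySem.Chars.startswith n ['a','m','y','_'] = true) :
    PySem.Chars.startswith n ['m','r','i','_'] = false := by
  rcases (PySem.Chars.startswith_iff _ _).mp h with ⟨t, ht⟩
  cases hs : PySem.Chars.startswith n ['m','r','i','_'] with
  | false => rfl
  | true =>
    exfalso
    rcases (PySem.Chars.startswith_iff _ _).mp hs with ⟨u, hu⟩
    rw [← ht] at hu
    simp at hu

theorem sexcl_am (n : String) (h : PySem.Str.startswith n "amy_" = true) :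
    PySem.Str.startswith n "mri_" = false := by
  simp only [PySem.Str.startswith_eq] at h ⊢
  exact excl_amy_mri _ h

theorem sexcl_ad (n : String) (h : PySem.Str.startswith n "amy_" = true) :
    (n == "demographic") = false := by
  cases he : (n == "demographic") with
  | false => rfl
  | true =>
    exfalso
    rw [show n = "demographic" from by exact beq_iff_eq.mp he] at h
    exact absurd h (by decide)

theorem sexcl_md (n : String) (h : PySem.Str.startswith n "mri_" = true) :
    (n == "demographic") = false := by
  cases he : (n == "demographic") with
  | false => rfl
  | true =>
    exfalso
    rw [show n = "demographic" from by exact beq_iff_eq.mp he] at h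
    exact absurd h (by decide)

-- one step of A's loop on a bucket dict with keys among the three modalities
theorem aStep_eq (wkeys : List String)
    (hw : ∀ k ∈ wkeys, k = "amy" ∨ k = "mri" ∨ k = "demographic")
    (f : String → List String) (e : String) (c : List String) :
    aLoopStep (wkeys.map fun k => (k, f k)) (e, c)
      = wkeys.map fun k => (k, if bMatches k (PySem.Str.lower e) then f k ++ c else f k) := by
  have hany_t : ∀ s : String, s ∈ wkeys →
      ((wkeys.map fun k => ((k, f k) : String × List String)).any (fun kv => kv.1 == s)) = true := by
    intro s hs
    rw [List.any_map]
    exact List.any_eq_true.mpr ⟨s, hs, by simp⟩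
  have hany_f : ∀ s : String, s ∉ wkeys →
      ((wkeys.map fun k => ((k, f k) : String × List String)).any (fun kv => kv.1 == s)) = false := by
    intro s hs
    rw [List.any_map, List.any_eq_false]
    intro k hk
    simp only [Function.comp_apply, beq_iff_eq]
    exact fun h => hs (h ▸ hk)
  simp only [aLoopStep]
  cases s1 : PySem.Str.startswith (PySem.Str.lower e) "amy_" <;>
  cases s2 : PySem.Str.startswith (PySem.Str.lower e) "mri_" <;>
  cases s3 : (PySem.Str.lower e == "demographic")
  · -- all false
    simp only [Bool.false_and]
    rw [if_neg (by decide), if_neg (by decide), if_neg (by decide)]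
    simp at s1 s2 s3
    refine (List.map_congr_left fun k hk => ?_).symm
    rcases hw k hk with rfl | rfl | rfl <;> simp [bMatches, s1, s2, s3]
  · -- demographic
    simp only [Bool.false_and, Bool.true_and]
    rw [if_neg (by decide), if_neg (by decide)]
    simp at s1 s2 s3
    by_cases hm : "demographic" ∈ wkeys
    · rw [hany_t _ hm, if_pos rfl, List.map_map]
      refine List.map_congr_left fun k hk => ?_
      rcases hw k hk with rfl | rfl | rfl <;> simp [bMatches, s1, s2, s3] <;>
        (intro h; exact absurd h (by decide))
    · rw [hany_f _ hm, if_neg (by decide)]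
      refine (List.map_congr_left fun k hk => ?_).symm
      rcases hw k hk with rfl | rfl | rfl
      · simp [bMatches, s1]
      · simp [bMatches, s2]
      · exact absurd hk hm
  · -- mri
    have s3' := s3
    simp only [Bool.false_and, Bool.true_and]
    rw [if_neg (by decide)]
    simp at s1 s2 s3
    by_cases hm : "mri" ∈ wkeys
    · rw [hany_t _ hm, if_pos rfl, List.map_map]
      refine List.map_congr_left fun k hk => ?_
      rcases hw k hk with rfl | rfl | rfl <;> simp [bMatches, s1, s2, s3]
    · rw [hany_f _ hm, if_neg (by decide), if_neg (by simp [s3'])]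
      refine (List.map_congr_left fun k hk => ?_).symm
      rcases hw k hk with rfl | rfl | rfl
      · simp [bMatches, s1]
      · exact absurd hk hm
      · simp [bMatches, s3]
  · -- mri and demographic both true: impossible
    rw [sexcl_md _ s2] at s3
    exact absurd s3 (by decide)
  · -- amy
    simp only [Bool.true_and, Bool.false_and]
    simp at s1 s2 s3
    by_cases hm : "amy" ∈ wkeys
    · rw [hany_t _ hm, if_pos rfl, List.map_map]
      refine List.map_congr_left fun k hk => ?_
      rcases hw k hk with rfl | rfl | rfl <;> simp [bMatches, s1, s2, s3]
    · rw [hany_f _ hm, if_neg (by decide), if_neg (by decide), if_neg (by decide)]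
      refine (List.map_congr_left fun k hk => ?_).symm
      rcases hw k hk with rfl | rfl | rfl
      · exact absurd hk hm
      · simp [bMatches, s2]
      · simp [bMatches, s3]
  · rw [sexcl_ad _ s1] at s3
    exact absurd s3 (by decide)
  · rw [sexcl_am _ s1] at s2
    exact absurd s2 (by decide)
  · rw [sexcl_am _ s1] at s2
    exact absurd s2 (by decide)

-- A's whole loop, on a bucket dict with keys among the three modalities
theorem aLoop_eq (gs : List (String × List String)) (wkeys : List String)
    (hw : ∀ k ∈ wkeys, k = "amy" ∨ k = "mri" ∨ k = "demographic")
    (f : String → List String) :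
    gs.foldl aLoopStep (wkeys.map fun k => (k, f k))
      = wkeys.map fun k =>
          (k, gs.foldl (fun cs ec => if bMatches k (PySem.Str.lower ec.1) then cs ++ ec.2 else cs) (f k)) := by
  induction gs generalizing f with
  | nil => simp
  | cons ec gs ih =>
    rw [List.foldl_cons, show aLoopStep (wkeys.map fun k => (k, f k)) ec
          = wkeys.map fun k => (k, if bMatches k (PySem.Str.lower ec.1) then f k ++ ec.2 else f k) from
        aStep_eq wkeys hw f ec.1 ec.2, ih]
    simp [List.foldl_cons]

-- membership in the want set
theorem mem_want_fold (cs : List Char) (s : PySem.Set String) (m : String) :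
    m ∈ cs.foldl (fun s c =>
        match List.lookup c pyMapping with
        | some m' => PySem.Set.add s m'
        | none => s) s
      ↔ m ∈ s ∨ ∃ c ∈ cs, List.lookup c pyMapping = some m := by
  induction cs generalizing s with
  | nil => simp
  | cons c cs ih =>
    simp only [List.foldl_cons]
    cases hl : List.lookup c pyMapping with
    | none => rw [ih]; simp [hl]
    | some m' =>
      rw [ih]
      constructor
      · rintro (h | ⟨c', hc', hl'⟩)
        · rw [PySem.Set.mem_add] at h
          rcases h with h' | rfl
          · exact Or.inl h'
          · exact Or.inr ⟨c, List.mem_cons_self, hl⟩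
        · exact Or.inr ⟨c', List.mem_cons_of_mem _ hc', hl'⟩
      · rintro (h | ⟨c', hc', hl'⟩)
        · exact Or.inl (by rw [PySem.Set.mem_add]; exact Or.inl h)
        · rcases List.mem_cons.mp hc' with rfl | hc''
          · rw [hl] at hl'
            injection hl' with hh
            exact Or.inl (by rw [PySem.Set.mem_add]; exact Or.inr hh.symm)
          · exact Or.inr ⟨c', hc'', hl'⟩

theorem lookup_eq_amy (c : Char) : List.lookup c pyMapping = some "amy" ↔ c = 'A' := by
  simp only [pyMapping, List.lookup]
  by_cases hA : c = 'A'
  · subst hA; simp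
  · by_cases hM : c = 'M'
    · subst hM; simp
    · by_cases hD : c = 'D'
      · subst hD; simp
      · simp [beq_eq_false_iff_ne.mpr hA, beq_eq_false_iff_ne.mpr hM,
              beq_eq_false_iff_ne.mpr hD, hA, hM, hD]

theorem lookup_eq_mri (c : Char) : List.lookup c pyMapping = some "mri" ↔ c = 'M' := by
  simp only [pyMapping, List.lookup]
  by_cases hA : c = 'A'
  · subst hA; simp
  · by_cases hM : c = 'M'
    · subst hM; simp
    · by_cases hD : c = 'D'
      · subst hD; simp
      · simp [beq_eq_false_iff_ne.mpr hA, beq_eq_false_iff_ne.mpr hM,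
              beq_eq_false_iff_ne.mpr hD, hA, hM, hD]

theorem lookup_eq_dem (c : Char) : List.lookup c pyMapping = some "demographic" ↔ c = 'D' := by
  simp only [pyMapping, List.lookup]
  by_cases hA : c = 'A'
  · subst hA; simp
  · by_cases hM : c = 'M'
    · subst hM; simp
    · by_cases hD : c = 'D'
      · subst hD; simp
      · simp [beq_eq_false_iff_ne.mpr hA, beq_eq_false_iff_ne.mpr hM,
              beq_eq_false_iff_ne.mpr hD, hA, hM, hD]

theorem contains_want_amy (sl : String) :
    PySem.Set.contains (aWant sl) "amy" = (PySem.Str.upper sl).toList.contains 'A' := by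
  rw [Bool.eq_iff_iff]
  rw [PySem.Set.contains_iff]
  unfold aWant
  rw [mem_want_fold]
  simp [lookup_eq_amy, List.contains_iff_mem, eq_comm]

theorem contains_want_mri (sl : String) :
    PySem.Set.contains (aWant sl) "mri" = (PySem.Str.upper sl).toList.contains 'M' := by
  rw [Bool.eq_iff_iff, PySem.Set.contains_iff]
  unfold aWant
  rw [mem_want_fold]
  simp [lookup_eq_mri, List.contains_iff_mem, eq_comm]

theorem contains_want_dem (sl : String) :
    PySem.Set.contains (aWant sl) "demographic" = (PySem.Str.upper sl).toList.contains 'D' := by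
  rw [Bool.eq_iff_iff, PySem.Set.contains_iff]
  unfold aWant
  rw [mem_want_fold]
  simp [lookup_eq_dem, List.contains_iff_mem, eq_comm]

theorem contains_sel (sl : String) (c : Char) :
    PySem.Set.contains (PySem.Set.ofList (PySem.Str.upper sl).toList) c
      = (PySem.Str.upper sl).toList.contains c := by
  rw [Bool.eq_iff_iff, PySem.Set.contains_iff, PySem.Set.mem_ofList]
  simp [List.contains_iff_mem]

theorem dedup_eq_nil_iff (l : List String) : PySem.List.dedup l = [] ↔ l = [] := by
  constructor
  · intro h
    cases l with
    | nil => rfl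
    | cons x xs =>
      exfalso
      have : x ∈ PySem.List.dedup (x :: xs) := by
        rw [PySem.List.mem_dedup]; exact List.mem_cons_self
      rw [h] at this
      exact absurd this (List.not_mem_nil)
  · rintro rfl; rfl

-- A's loop from the initial all-empty buckets collects exactly B's per-modality scans
theorem aLoop_eq' (gs : List (String × List String)) (wkeys : List String)
    (hw : ∀ k ∈ wkeys, k = "amy" ∨ k = "mri" ∨ k = "demographic") :
    gs.foldl aLoopStep (wkeys.map fun k => (k, ([] : List String)))
      = wkeys.map fun k => (k, bCollect gs k) :=
  aLoop_eq gs wkeys hw (fun _ => [])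

-- B's fold over the (modality, letter) pairs, against A's filter/dedup comprehension
theorem assemble (groups : List (String × List String)) (sl : String) (p : String → Bool)
    (mls : List (String × Char)) (acc : List (String × List String))
    (h : ∀ ml ∈ mls, PySem.Set.contains (PySem.Set.ofList (PySem.Str.upper sl).toList) ml.2 = p ml.1) :
    mls.foldl (fun out ml =>
      if PySem.Set.contains (PySem.Set.ofList (PySem.Str.upper sl).toList) ml.2 then
        if (PySem.List.dedup (bCollect groups ml.1)).isEmpty then out
        else out ++ [(ml.1, PySem.List.dedup (bCollect groups ml.1))]
      else out) acc
      = acc ++ ((((mls.map Prod.fst).filter p).map (fun k => (k, bCollect groups k))).filter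
          (fun kv => kv.2.length > 0)).map (fun kv => (kv.1, PySem.List.dedup kv.2)) := by
  induction mls generalizing acc with
  | nil => simp
  | cons ml rest ih =>
    simp only [List.foldl_cons, List.map_cons, List.filter_cons]
    rw [h ml List.mem_cons_self]
    have hrest := fun x hx => h x (List.mem_cons_of_mem _ hx)
    cases hp : p ml.1 with
    | false =>
      simp only [hp, Bool.false_eq_true, if_false]
      exact ih acc hrest
    | true =>
      simp only [hp, if_true]
      by_cases hc : bCollect groups ml.1 = []
      · rw [if_pos (List.isEmpty_iff.mpr ((dedup_eq_nil_iff _).mpr hc)), ih acc hrest]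
        simp [hc]
      · rw [if_neg (fun hh => hc ((dedup_eq_nil_iff _).mp (List.isEmpty_iff.mp hh))), ih _ hrest]
        have hlen : (decide (0 < (bCollect groups ml.1).length)) = true := by
          simp [List.length_pos_iff, hc]
        simp only [List.map_cons, List.filter_cons, hlen, if_true, List.map_cons,
          List.append_assoc, List.singleton_append, List.cons_append, List.nil_append]

-- ===== VERDICT (by name: the statement is the Claim_ definition above) =====
theorem flex_modality_groups_py_spec : Claim_equal_flex_modality_groups_py := by
  intro groups sl _ _
  unfold Spec_flex_modality_groups_py
  simp only [flex_modality_groups_py, flex_modality_groups_py_alt, aOut0]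
  rw [aLoop_eq' groups (["amy", "mri", "demographic"].filter
        (fun k => PySem.Set.contains (aWant sl) k)) ?hw]
  case hw =>
    intro k hk
    have := (List.mem_filter.mp hk).1
    simp at this
    tauto
  rw [assemble groups sl (fun k => PySem.Set.contains (aWant sl) k)
        [("amy", 'A'), ("mri", 'M'), ("demographic", 'D')] [] ?hagree]
  case hagree =>
    intro ml hm
    simp at hm
    rcases hm with rfl | rfl | rfl
    · show PySem.Set.contains (PySem.Set.ofList (PySem.Str.upper sl).toList) 'A'
          = PySem.Set.contains (aWant sl) "amy"
      rw [contains_sel, contains_want_amy]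
    · show PySem.Set.contains (PySem.Set.ofList (PySem.Str.upper sl).toList) 'M'
          = PySem.Set.contains (aWant sl) "mri"
      rw [contains_sel, contains_want_mri]
    · show PySem.Set.contains (PySem.Set.ofList (PySem.Str.upper sl).toList) 'D'
          = PySem.Set.contains (aWant sl) "demographic"
      rw [contains_sel, contains_want_dem]
  simp
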